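/- GENERATED by mk_final_copies.py from the proof of the farm's unit `inverse_mdct.3` (farm:inverse_mdct.3.1: Proof.lean) as the
   re-elaboration sweep compiled it — do not edit. -/
import Asan.CheckWalk
import Vorbis.Spec.MdctUse
import Vorbis.Spec.Units.inverse_mdct_3

open X86 X86.User Asan Vorbis Vorbis.Spec

set_option maxRecDepth 4000
set_option maxHeartbeats 4000000

namespace Vorbis.Spec.inverse_mdct_3

/-- The walker's form of `movsxd rax, DWORD PTR [rbp-0x80] ; shl rax, 2` (0x109494, 0x109498: `&v[n4]`, `&u[n4]` of line 2724)
for the non-negative `int` `m = n4`, as a number: `4 m`. -/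
theorem sext32_shl2_toNat (m : Nat) (hm : m < 2 ^ 29) :
    (Word.ofBV (BitVec.signExtend 64 (BitVec.ofNat 32 m)) <<< 2).toNat = 4 * m := by
  have h0 : (BitVec.ofNat 32 m).toNat = m := toNat_ofNat32 m (by omega)
  have h1 : (Word.ofBV (BitVec.signExtend 64 (BitVec.ofNat 32 m))).toNat = m := by
    rw [toNat_sext32 _ (by omega), h0]
  rw [UInt64.toNat_shiftLeft, h1]
  have e2 : (2 : UInt64).toNat % 64 = 2 := by decide
  rw [e2, Nat.shiftLeft_eq]
  omega

end Vorbis.Spec.inverse_mdct_3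

/-- Segment 3 of `inverse_mdct` (`loop2` = 0x109471 … 0x1094b3 `jmp loop3`): the loop L2 of line 2701 `while (d >= buf2)` (body
0x1093c4 – 0x10946d: four checked loads from `u` and `A`, two checked stores into the temp block `v`, one float scratch slot) and
the step-2 set-up (lines 2721 – 2727), from the assertion `At3` at the loop head to `At4` at the head of the step-2 loop.
THE INVARIANT after `t ≤ n8` iterations (CONTRACTS 40, L2; `Mdct.L2`): `r12 + 8 t + 8 = v + 4·n4`, `rbx = A + 4·n4 + 8 t`,
`r13 + 16 t + 12 = u + 4·n2`, `r15 = v`; `rsp`, `rbp`; since the segment's entry only the return-address slot of the check calls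
`[rsp₀ − 192, rsp₀ − 184)`, the float scratch `d[rbp−50H]` and the temp block were written (`hsame`), and no shadow byte (`hun`).
NO STACK SLOT is carried through the loop: the slots the tail loads and the slots of `At4` are read back through `hsame` from the
entry assertion (`u_frame`). MEASURE: `r12` (it steps down by 8 while `r12 ≥ v ≥ 8`). -/
theorem Vorbis.Spec.Worked.inverse_mdct_3_ok : Vorbis.Spec.inverse_mdct_3.Statement := by
  intro Lay hLay μ hμ u₀ hcode hload4 hstore4 others frames len A stored room ysz k c ue ret v hat
  have hb := hat.body
  have hp := hb.pre
  have he := hb.entry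
  v_entry he
  have hAR1 := hp.ado.ok.AR1
  have hAR1x := hp.ado.ok.AR1x
  have hAR2 := hp.ado.ok.AR2
  have hr := hp.tmp_range
  have hnf := hp.isBlocksize.facts
  have hnle := hp.n_le
  have hbufin := hp.ok.inside _ hp.buf_blk
  have hAin := hp.ok.inside _ hp.tabA_blk
  have htxt : 0x119d40 ≤ A.B := hp.arenaText
  simp only [] at hbufin hAin
  have hLbuf : LiveBytes (A.newTempObj (2 * inverse_mdct.n ue) :: others) frames (inverse_mdct.buf ue)
      (4 * bsize ue.mem (inverse_mdct.f ue) 1) :=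
    LiveBytes.of_block (hp.blkLive _ _ hp.buf_blk) (Nat.le_refl _) (Nat.le_refl _)
  have hLA : LiveBytes (A.newTempObj (2 * inverse_mdct.n ue) :: others) frames (inverse_mdct.tabA ue)
      (2 * inverse_mdct.n ue) :=
    LiveBytes.of_block (hp.blkLive _ _ hp.tabA_blk) (Nat.le_refl _) (Nat.le_refl _)
  have hLtmp : LiveBytes (A.newTempObj (2 * inverse_mdct.n ue) :: others) frames (inverse_mdct.tmp A ue)
      (2 * inverse_mdct.n ue) := inverse_mdct.tmp_live A ue
  have hshadow := hb.shadow
  -- the loop state: a copy of `v`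
  obtain ⟨s, hsv⟩ : ∃ s : State, s = v := ⟨v, rfl⟩
  rw [← hsv]
  obtain ⟨t, ht, hr12, hrbx, hr13⟩ : ∃ t : Nat, t ≤ inverse_mdct.n ue / 8 ∧
      (s.reg .r12).toNat + 8 * t + 8 = inverse_mdct.tmp A ue + 4 * (inverse_mdct.n ue / 4) ∧
      (s.reg .rbx).toNat = inverse_mdct.tabA ue + 4 * (inverse_mdct.n ue / 4) + 8 * t ∧
      (s.reg .r13).toNat + 16 * t + 12 = inverse_mdct.buf ue + 4 * (inverse_mdct.n ue / 2) := by
    refine ⟨0, Nat.zero_le _, ?_, ?_, ?_⟩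
    · rw [hsv]
      exact hat.r12
    · rw [hsv]
      exact hat.rbx
    · rw [hsv]
      exact hat.r13
  have hr15 : (s.reg .r15).toNat = inverse_mdct.tmp A ue := by
    rw [hsv]
    exact hat.r15
  have w_rip : s.rip = Vorbis.L.inverse_mdct.loop2 := by
    rw [hsv]
    exact hat.rip
  have hrsp : s.reg .rsp = ue.reg .rsp - 184 := by
    rw [hsv]
    exact hb.rsp
  have hrbp : s.reg .rbp = ue.reg .rsp - 8 := by
    rw [hsv]
    exact hb.rbp
  have w_eq : Mem.EqOn Vorbis.L.textLo Vorbis.L.textHi u₀.mem s.mem := by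
    rw [hsv]
    exact hb.code
  have hdf : s.flags .df = false := by
    rw [hsv]
    exact (show abiInv _ from hb.abi).1
  have hmx : s.mxcsr &&& 0x1F80 = 0x1F80 := by
    rw [hsv]
    exact (show abiInv _ from hb.abi).2
  have hsse : SseOK s := by
    rw [hsv]
    exact Vorbis.sseOK_of_abiInv hb.abi
  have hsame : Mem.SameExcept
      [⟨(ue.reg .rsp).toNat - 192, (ue.reg .rsp).toNat - 184⟩,
       ⟨(ue.reg .rsp).toNat - 88, (ue.reg .rsp).toNat - 84⟩,
       ⟨inverse_mdct.tmp A ue, inverse_mdct.tmp A ue + 2 * inverse_mdct.n ue⟩] v.mem s.mem := by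
    rw [hsv]
    exact Mem.SameExcept.refl _ _
  have hun : ShadowUntouched v.mem s.mem := by
    rw [hsv]
    exact Mem.EqOn.refl _ _ _
  clear hsv
  u_loop [t] (fun w => (w.reg .r12).toNat)
  -- the five slots the tail loads, at the head's memory
  have sA : s.mem.readLE (ue.reg .rsp - 72) 8 = inverse_mdct.tabA ue := by
    u_frame hat.sA.aSlot
  have sN2x4 : s.mem.readLE (ue.reg .rsp - 144) 8 = 4 * (inverse_mdct.n ue / 2) := by
    u_frame hat.sA.n2x4Slot
  have sN4 : s.mem.readLE (ue.reg .rsp - 136) 4 = inverse_mdct.n ue / 4 := by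
    u_frame hat.n4Slot
  have sV : s.mem.readLE (ue.reg .rsp - 112) 8 = inverse_mdct.tmp A ue := by
    u_frame hb.vSlot
  have sU : UInt64.ofNat (s.mem.readLE (ue.reg .rsp - 64) 8) = ue.reg .rdi := by
    u_frame hat.sBuf.uSlot
  u_walk hcode [hμ.vendor] until [Vorbis.L.inverse_mdct.loop2, Vorbis.L.inverse_mdct.loop3] span [Vorbis.L.textLo, Vorbis.L.textHi] side (v_side)
  case check_1093c8 =>
    -- 0x1093c8, line 2702: load4 `e[2]` = u[n2 − 1 − 4t], inside the sample buffer
    have hun' : ShadowUntouched v.mem s_1093c8.mem := by v_untouched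
    exact hLbuf.accSmall hshadow hun' _ 4 (by decide) (by u_omega) (by u_omega)
  case check_1093e2 =>
    -- 0x1093e2, line 2702: load4 `AA[0]` = A[n4 + 2t], inside the twiddle table
    have hun' : ShadowUntouched v.mem s_1093e2.mem := by v_untouched
    exact hLA.accSmall hshadow hun' _ 4 (by decide) (by u_omega) (by u_omega)
  case check_1093f8 =>
    -- 0x1093f8, line 2702: load4 `e[0]` = u[n2 − 3 − 4t], inside the sample buffer
    have hun' : ShadowUntouched v.mem s_1093f8.mem := by v_untouched
    exact hLbuf.accSmall hshadow hun' _ 4 (by decide) (by u_omega) (by u_omega)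
  case check_109405 =>
    -- 0x109405, line 2702: load4 `AA[1]` = A[n4 + 2t + 1], inside the twiddle table
    have hun' : ShadowUntouched v.mem s_109405.mem := by v_untouched
    exact hLA.accSmall hshadow hun' _ 4 (by decide) (by u_omega) (by u_omega)
  case check_109423 =>
    -- 0x109423, line 2702: store4 `d[1]` = v[n4 − 1 − 2t], inside the temp block
    have hun' : ShadowUntouched v.mem s_109423.mem := by v_untouched
    exact hLtmp.accSmall hshadow hun' _ 4 (by decide) (by u_omega) (by u_omega)
  case check_10945c =>
    -- 0x10945c, line 2703: store4 `d[0]` = v[n4 − 2 − 2t], inside the temp block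
    have hun' : ShadowUntouched v.mem s_10945c.mem := by v_untouched
    exact hLtmp.accSmall hshadow hun' _ 4 (by decide) (by u_omega) (by u_omega)
  case cont =>
    -- the back edge (0x10946d → loop2): the invariant for t + 1
    try clear w_zmm
    u_loop_back [t + 1]
    · u_omega
    · rw [w_r12]
      u_omega
    · rw [w_rbx]
      u_omega
    · rw [w_r13]
      u_omega
    · rw [w_kept .r15 rfl]
      exact hr15
    · rw [w_kept .rbp rfl]
      exact hrbp
    · rw [w_flags]
      simp only [X86.User.df_setStatus]
      exact w_df_10945c
    · rw [w_mxcsr]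
      exact hmx_109450
    · refine ⟨?_⟩
      rw [w_mxcsr]
      exact hmx_109450
    · v_untouched
    · rw [w_r12]
      u_omega
  case cont =>
    -- the exit (0x10947a … 0x1094b3 `jmp loop3`): `At4`
    have htn : t = inverse_mdct.n ue / 8 := by u_omega
    have hn4 : inverse_mdct.n ue / 4 < 2 ^ 29 := by omega
    have hbuf : (ue.reg .rdi).toNat = inverse_mdct.buf ue := (inverse_mdct.buf_def ue).symm
    have hrax := Vorbis.Spec.inverse_mdct_3.sext32_shl2_toNat (inverse_mdct.n ue / 4) hn4
    refine ReachVia.done (Or.inl ?_)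
    refine ⟨w_rip, ?_, ⟨?_, ?_, ?_⟩, ⟨?_, ?_, ?_, ?_⟩, ⟨?_, ?_⟩, ?_, ?_, ?_, ?_, ?_, ?_⟩
    · -- the shared part: `Body.carry` over the stores of the segment
      refine inverse_mdct.Body.carry hb ?_ w_eq ?_ ?_ ?_ ?_ ?_ ?_ ?_ ?_ ?_ ?_ ?_ ?_ ?_ ?_
      · u_same
      · v_inv
      · rw [w_kept .rbp rfl]
        exact hrbp
      · rw [w_kept .rsp rfl]
        exact hrsp
      · u_frame hb.retSlot
      · u_frame hb.rbpSlot
      · u_frame hb.r15Slot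
      · u_frame hb.r14Slot
      · u_frame hb.r13Slot
      · u_frame hb.r12Slot
      · u_frame hb.rbxSlot
      · u_frame hb.fSlot
      · u_frame hb.btSlot
      · u_frame hb.saveSlot
      · u_frame hb.vSlot
    · u_frame hat.sBuf.uSlot
    · u_frame hat.sBuf.nSlot
    · u_frame hat.sBuf.uMidSlot
    · u_frame hat.sA.aSlot
    · u_frame hat.sA.n2Slot
    · u_frame hat.sA.n2x4Slot
    · u_frame hat.sA.n8Slot
    · -- q[rbp-0x98] = 4·n2 − 32, stored at 0x109485
      u_resolve
      u_omega
    · -- q[rbp-0xa0] = 4·n4, stored at 0x10949c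
      u_resolve
    · u_frame hat.n4Slot
    · rw [w_rbx]
      u_omega
    · rw [w_r13]
      u_omega
    · rw [w_r12]
      u_omega
    · rw [w_r14]
      u_omega
    · rw [w_r15]
      exact hbuf
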